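-- pv_equiv track=rewrite | github.com/epilectrik/voynich | phases/PP_RI_RETEST/scripts/independent_retest.py | substring_containment
-- ===== SOURCE A (Python) =====
-- def substring_containment(ri_set, pp_set):
--     """Count RI with at least one PP substring."""
--     count = 0
--     for ri in ri_set:
--         for pp in pp_set:
--             if pp in ri and pp != ri:
--                 count += 1
--                 break
--     return count
-- ===== SOURCE B (Python) =====
-- def substring_containment(ri_set, pp_set):
--     """Count RI with at least one PP substring (hash-set of patterns, enumerate substrings)."""
--     patterns = set(pp_set)
--     count = 0
--     for ri in ri_set:
--         n = len(ri)
--         if any(ri[i:j] in patterns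
--                for i in range(n + 1)
--                for j in range(i, n + 1)
--                if j - i != n):
--             count += 1
--     return count
-- ===== Notes on version B (the rewrite author's own statement) =====
-- stated objective: faster
-- what changed: A scans the whole pattern list for every RI string (pp in ri per pattern); B builds a hash set of the patterns once and, for each RI, enumerates its proper substrings and tests set membership, so the per-RI cost no longer depends on the number of patterns.
import Mathlib
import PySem

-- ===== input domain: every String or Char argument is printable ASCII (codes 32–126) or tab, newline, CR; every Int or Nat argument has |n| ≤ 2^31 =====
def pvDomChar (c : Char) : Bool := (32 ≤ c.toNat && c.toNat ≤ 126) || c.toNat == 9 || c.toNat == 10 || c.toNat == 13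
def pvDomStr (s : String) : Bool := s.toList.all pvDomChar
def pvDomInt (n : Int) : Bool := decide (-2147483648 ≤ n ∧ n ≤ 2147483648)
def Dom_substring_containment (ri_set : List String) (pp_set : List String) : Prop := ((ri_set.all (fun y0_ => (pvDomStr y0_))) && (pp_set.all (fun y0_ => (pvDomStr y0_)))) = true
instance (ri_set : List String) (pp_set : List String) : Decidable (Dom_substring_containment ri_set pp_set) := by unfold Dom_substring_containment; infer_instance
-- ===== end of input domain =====

-- B replaces A's pattern scan per RI (`pp in ri` for every PP) by a hash set of the patterns and an
-- enumeration of each RI's proper substrings; same return value, alternative algorithm.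

-- ===== PORT A =====
-- inner 'for pp in pp_set: if pp in ri and pp != ri: count += 1; break' — the increment (1 on break, 0 at loop end)
def pvAInner (ri : String) : List String → Int
  | [] => 0
  | pp :: rest => if PySem.Str.isIn pp ri && pp != ri then 1 else pvAInner ri rest

def substring_containment (ri_set : List String) (pp_set : List String) : Int :=
  ri_set.foldl (fun count ri => count + pvAInner ri pp_set) 0

-- ===== PORT B =====
-- 'any(ri[i:j] in patterns for i in range(n+1) for j in range(i, n+1) if j - i != n)'
def pvBHit (patterns : PySem.Set String) (ri : String) : Bool :=
  let n : Int := PySem.Str.len ri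
  (PySem.List.pyRange 0 (n + 1) 1).any (fun i =>
    (PySem.List.pyRange i (n + 1) 1).any (fun j =>
      (j - i != n) && PySem.Set.contains patterns (PySem.Str.slice ri (some i) (some j))))

def substring_containment_alt (ri_set : List String) (pp_set : List String) : Int :=
  let patterns : PySem.Set String := PySem.Set.ofList pp_set
  ri_set.foldl (fun count ri => if pvBHit patterns ri then count + 1 else count) 0

-- ===== PRECONDITION & SPEC =====
def Spec_substring_containment (ri_set : List String) (pp_set : List String) (out : Int) : Prop := out = substring_containment_alt ri_set pp_set
instance (ri_set : List String) (pp_set : List String) (out : Int) : Decidable (Spec_substring_containment ri_set pp_set out) := by unfold Spec_substring_containment; infer_instance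

-- ===== CLAIM (what is proved, stated in full; the proofs are below) =====
def Claim_equal_substring_containment : Prop := ∀ (ri_set : List String) (pp_set : List String), Dom_substring_containment ri_set pp_set → Spec_substring_containment ri_set pp_set (substring_containment ri_set pp_set)

-- ===== LEMMAS AND PROOFS =====

-- A's inner loop returns 1 iff some pattern is a proper substring
theorem pvAInner_eq (ri : String) (ps : List String) :
    pvAInner ri ps = if ps.any (fun pp => PySem.Str.isIn pp ri && pp != ri) then 1 else 0 := by
  induction ps with
  | nil => simp [pvAInner]
  | cons pp rest ih =>
      rw [pvAInner, List.any_cons]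
      cases h : (PySem.Str.isIn pp ri && pp != ri) with
      | false => simpa using ih
      | true => simp

-- a slice ri[i:j] with 0 ≤ i ≤ j and j - i ≠ len(ri) is a proper substring of ri
theorem pvSliceProper (ri : String) (i j : Int) (h0 : 0 ≤ i) (h0j : 0 ≤ j)
    (hij : i ≤ j) (hjn : j - i ≠ (ri.toList.length : Int)) (hj : j ≤ (ri.toList.length : Int)) :
    PySem.Str.isIn (PySem.Str.slice ri (some i) (some j)) ri = true ∧
    PySem.Str.slice ri (some i) (some j) ≠ ri := by
  have htl : (PySem.Str.slice ri (some i) (some j)).toList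
      = List.take (j.toNat - i.toNat) (List.drop i.toNat ri.toList) := by
    rw [PySem.Str.toList_slice, PySem.Chars.slice_eq_listSlice,
      PySem.List.slice_toNat _ h0 h0j]
  constructor
  · rw [PySem.Str.isIn_iff_infix, htl]
    exact (List.take_prefix _ _).isInfix.trans (List.drop_suffix _ _).isInfix
  · intro he
    have : (PySem.Str.slice ri (some i) (some j)).toList.length < ri.toList.length := by
      rw [htl]
      simp only [List.length_take, List.length_drop]
      omega
    rw [he] at this; omega

-- the two per-string tests agree
theorem pvHit_iff (pp_set : List String) (ri : String) :
    pvBHit (PySem.Set.ofList pp_set) ri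
      = pp_set.any (fun pp => PySem.Str.isIn pp ri && pp != ri) := by
  rw [Bool.eq_iff_iff]
  simp only [pvBHit, PySem.Str.len_eq, List.any_eq_true, Bool.and_eq_true, bne_iff_ne,
    ne_eq, PySem.List.mem_pyRange_one]
  constructor
  · rintro ⟨i, ⟨h0i, hi⟩, j, ⟨hij, hj⟩, hne, hcon⟩
    refine ⟨PySem.Str.slice ri (some i) (some j), ?_, ?_, ?_⟩
    · exact (PySem.Set.mem_ofList pp_set _).mp ((PySem.Set.contains_iff _ _).mp hcon)
    · exact (pvSliceProper ri i j h0i (le_trans h0i hij) hij hne (by omega)).1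
    · exact (pvSliceProper ri i j h0i (le_trans h0i hij) hij hne (by omega)).2
  · rintro ⟨pp, hmem, hin, hne⟩
    obtain ⟨s, t, hst⟩ := (PySem.Str.isIn_iff_infix pp ri).mp hin
    refine ⟨(s.length : Int), ⟨by omega, ?_⟩, (s.length : Int) + (pp.toList.length : Int),
      ⟨by omega, ?_⟩, ?_, ?_⟩
    · have : s.length + pp.toList.length + t.length = ri.toList.length := by
        rw [← hst]; simp [Nat.add_assoc]
      omega
    · have : s.length + pp.toList.length + t.length = ri.toList.length := by
        rw [← hst]; simp [Nat.add_assoc]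
      omega
    · intro h
      have hlen : pp.toList.length = ri.toList.length := by omega
      have hsub : pp.toList.Sublist ri.toList := (List.IsInfix.sublist ⟨s, t, hst⟩)
      exact hne (String.toList_inj.mp (hsub.eq_of_length hlen))
    · have hsl : PySem.Str.slice ri (some (s.length : Int))
          (some ((s.length : Int) + (pp.toList.length : Int))) = pp := by
        apply String.toList_inj.mp
        rw [PySem.Str.toList_slice, PySem.Chars.slice_eq_listSlice]
        have : ((s.length : Int) + (pp.toList.length : Int)) = ((s.length + pp.toList.length : Nat) : Int) := by push_cast; ring
        rw [this, PySem.List.slice_natCast]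
        rw [← hst, List.append_assoc, List.drop_left]
        simp
      rw [hsl]
      exact (PySem.Set.contains_iff _ _).mpr ((PySem.Set.mem_ofList pp_set pp).mpr hmem)

-- ===== VERDICT (by name: the statement is the Claim_ definition above) =====
theorem substring_containment_spec : Claim_equal_substring_containment := by
  intro ri_set pp_set _
  unfold Spec_substring_containment
  show (ri_set.foldl (fun count ri => count + pvAInner ri pp_set) 0)
      = (ri_set.foldl (fun count ri =>
          if pvBHit (PySem.Set.ofList pp_set) ri then count + 1 else count) 0)
  have hf : (fun (count : Int) ri => count + pvAInner ri pp_set)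
      = (fun (count : Int) ri =>
          if pvBHit (PySem.Set.ofList pp_set) ri then count + 1 else count) := by
    funext count ri
    rw [pvAInner_eq, pvHit_iff]
    split_ifs <;> omega
  rw [hf]
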